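-- pv_equiv track=rewrite | github.com/ranasohaib079/Search-Engine | matching.py | search
-- ===== SOURCE A (Python) =====
-- import typing
--
-- def search(query: str, documents: typing.List[str]) -> typing.List[str]:
--     """
--     Naive search implementation.
--     :param query: The text to search for.
--     :param documents: A list of strings representing documents that we are searching over.
--     :return: Documents matching the query.
--     """
--     # The code in this function is equivalent to the following list comprehension:
--     # return [doc for doc in documents if boolean_term_match(query, doc)]
--     if not query.strip():
--         return []
--     out = []
--     for doc in documents:
--         if boolean_term_match(query=query, document=doc):
--             out.append(doc)
--     return out
--
-- def boolean_term_match(query: str, document: str) -> bool: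
--     """
--     Boolean matching function.
--     :param query: The text a user searched for.
--     :param document: A candidate document.
--     :return: True if all terms in the query are also in the document and False otherwise.
--     """
--     if not query:
--         return False
--     query_terms: typing.List[str] = query.lower().split()
--     document_terms: typing.List[str] = document.lower().split()
--     for term in query_terms:
--         if term not in document_terms:
--             return False
--     return True
-- ===== SOURCE B (Python) =====
-- def search(query, documents):
--     """Inverted-index re-implementation: one pass builds word -> set of doc
--     indices, then query terms intersect candidate indices; original order and
--     duplicates are preserved by emitting documents by index."""
--     if not query.strip():
--         return []
--     index = {}
--     for i, doc in enumerate(documents):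
--         for w in doc.lower().split():
--             index.setdefault(w, set()).add(i)
--     candidates = list(range(len(documents)))
--     for term in query.lower().split():
--         hits = index.get(term, set())
--         candidates = [i for i in candidates if i in hits]
--     return [documents[i] for i in candidates]
-- ===== Notes on version B (the rewrite author's own statement) =====
-- stated objective: faster
-- what changed: Replaces A's per-document list scans (each query term searched linearly in each document's word list) with an inverted index built in one pass (word -> set of doc indices); query terms then intersect candidate index lists and documents are emitted by original index, preserving order and duplicates.
import Mathlib
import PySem

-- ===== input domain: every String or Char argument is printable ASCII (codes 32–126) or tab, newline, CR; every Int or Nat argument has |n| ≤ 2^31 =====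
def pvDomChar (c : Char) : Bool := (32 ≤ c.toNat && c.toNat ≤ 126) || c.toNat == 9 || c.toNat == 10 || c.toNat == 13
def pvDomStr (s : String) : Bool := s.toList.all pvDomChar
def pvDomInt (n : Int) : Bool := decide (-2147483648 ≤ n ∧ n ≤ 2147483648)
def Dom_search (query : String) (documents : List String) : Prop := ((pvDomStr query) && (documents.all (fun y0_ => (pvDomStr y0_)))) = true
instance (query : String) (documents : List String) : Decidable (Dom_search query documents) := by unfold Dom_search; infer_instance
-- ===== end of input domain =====

-- B replaces A's per-document term scans by an inverted index (word -> set of document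
-- indices) intersected over the query terms; documents are emitted by original index.


-- ===== PORT A =====
def booleanTermMatch (query : String) (document : String) : Bool :=
  if query.toList = [] then false
  else
    let queryTerms := PySem.Str.split₀ (PySem.Str.lower query)
    let documentTerms := PySem.Str.split₀ (PySem.Str.lower document)
    queryTerms.all (fun term => documentTerms.contains term)   -- early-return loop = all

def search (query : String) (documents : List String) : List String :=
  if (PySem.Str.strip query).toList = [] then []
  else
    documents.foldl (fun out doc => if booleanTermMatch query doc then out ++ [doc] else out) []

-- ===== PORT B =====
-- doc.lower().split()
def wordsOf (s : String) : List String := PySem.Str.split₀ (PySem.Str.lower s)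

def search_alt (query : String) (documents : List String) : List String :=
  if (PySem.Str.strip query).toList = [] then []
  else
    -- index.setdefault(w, set()).add(i)  =  index[w] = index.get(w, set()) with i added
    let index : PySem.Dict String (PySem.Set Int) :=
      (PySem.List.enumerate documents).foldl
        (fun d p => (wordsOf p.2).foldl
          (fun d w => d.modify w PySem.Set.empty (fun s => PySem.Set.add s p.1)) d)
        PySem.Dict.empty
    let cands0 : List Int := PySem.List.pyRange 0 documents.length 1
    let cands := (wordsOf query).foldl
      (fun cs term =>
        let hits := index.getD term PySem.Set.empty
        cs.filter (fun i => PySem.Set.contains hits i)) cands0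
    -- documents[i]: every candidate index is in range, pyGetD is the total lookup
    cands.map (fun i => PySem.List.pyGetD documents i "")

-- ===== PRECONDITION & SPEC =====
def Spec_search (query : String) (documents : List String) (out : List String) : Prop := out = search_alt query documents
instance (query : String) (documents : List String) (out : List String) : Decidable (Spec_search query documents out) := by unfold Spec_search; infer_instance

-- ===== CLAIM (what is proved, stated in full; the proofs are below) =====
def Claim_equal_search : Prop := ∀ (query : String) (documents : List String), Dom_search query documents → Spec_search query documents (search query documents)

-- ===== LEMMAS AND PROOFS =====

-- inner loop of the index build: adding one document's words
theorem mem_getD_wordsFold (ws : List String) (d : PySem.Dict String (PySem.Set Int))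
    (i : Int) (t : String) (j : Int) :
    j ∈ (ws.foldl (fun d w => d.modify w PySem.Set.empty (fun s => PySem.Set.add s i)) d).getD t PySem.Set.empty
      ↔ j ∈ d.getD t PySem.Set.empty ∨ (j = i ∧ t ∈ ws) := by
  induction ws generalizing d with
  | nil => simp
  | cons w ws ih =>
    simp only [List.foldl_cons, ih, PySem.Dict.getD_modify, List.mem_cons]
    by_cases h : t = w
    · subst h
      simp [PySem.Set.mem_add]
      tauto
    · simp [h]

-- outer loop of the index build: j is in the set indexed by t iff some processed (index, doc) pair has j = index and t among doc's words
theorem mem_getD_buildIndex (ps : List (Int × String)) (d : PySem.Dict String (PySem.Set Int))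
    (t : String) (j : Int) :
    j ∈ (ps.foldl (fun d p => (wordsOf p.2).foldl
          (fun d w => d.modify w PySem.Set.empty (fun s => PySem.Set.add s p.1)) d) d).getD t PySem.Set.empty
      ↔ j ∈ d.getD t PySem.Set.empty ∨ ∃ p ∈ ps, j = p.1 ∧ t ∈ wordsOf p.2 := by
  induction ps generalizing d with
  | nil => simp
  | cons p ps ih =>
    simp only [List.foldl_cons, ih, mem_getD_wordsFold, List.mem_cons]
    constructor
    · rintro ((h | ⟨rfl, hw⟩) | ⟨q, hq, rfl, hw⟩)
      · exact Or.inl h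
      · exact Or.inr ⟨p, Or.inl rfl, rfl, hw⟩
      · exact Or.inr ⟨q, Or.inr hq, rfl, hw⟩
    · rintro (h | ⟨q, (rfl | hq), rfl, hw⟩)
      · exact Or.inl (Or.inl h)
      · exact Or.inl (Or.inr ⟨rfl, hw⟩)
      · exact Or.inr ⟨q, hq, rfl, hw⟩

-- folding a filter per term = one filter with `all`
theorem foldl_filter_all (ts : List String) (p : String → Int → Bool) (cs : List Int) :
    ts.foldl (fun cs t => cs.filter (fun i => p t i)) cs
      = cs.filter (fun i => ts.all (fun t => p t i)) := by
  induction ts generalizing cs with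
  | nil => simp
  | cons t ts ih => simp [ih, List.filter_filter, Bool.and_comm]

-- mapping a filtered index range back to elements is a filter of the list itself
theorem rangeFilterMap (docs : List String) (p : String → Bool) :
    ((PySem.List.pyRange 0 (docs.length : Int) 1).filter
        (fun i => p (PySem.List.pyGetD docs i ""))).map (fun i => PySem.List.pyGetD docs i "")
      = docs.filter p := by
  induction docs using List.reverseRecOn with
  | nil => simp [PySem.List.pyRange]
  | append_singleton ys y ih =>
    have hsplit : PySem.List.pyRange 0 ((ys.length : Int) + 1) 1
        = PySem.List.pyRange 0 (ys.length : Int) 1 ++ PySem.List.pyRange (ys.length : Int) ((ys.length : Int) + 1) 1 :=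
      PySem.List.pyRange_one_append 0 (ys.length) ((ys.length : Int) + 1) (by positivity) (by omega)
    have hlast : PySem.List.pyRange (ys.length : Int) ((ys.length : Int) + 1) 1 = [(ys.length : Int)] := by
      rw [PySem.List.pyRange_one_cons (by omega)]
      simp [PySem.List.pyRange]
    have hget : ∀ i ∈ PySem.List.pyRange 0 (ys.length : Int) 1,
        PySem.List.pyGetD (ys ++ [y]) i "" = PySem.List.pyGetD ys i "" := by
      intro i hi
      rw [PySem.List.mem_pyRange_one] at hi
      obtain ⟨k, rfl⟩ : ∃ k : Nat, i = (k : Int) := ⟨i.toNat, by omega⟩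
      have hk : k < ys.length := by exact_mod_cast hi.2
      simp [PySem.List.pyGetD_natCast, List.getD_eq_getElem?_getD, List.getElem?_append_left hk]
    have hgy : PySem.List.pyGetD (ys ++ [y]) (ys.length : Int) "" = y := by
      simp [PySem.List.pyGetD_natCast, List.getD_eq_getElem?_getD]
    rw [show ((ys ++ [y]).length : Int) = (ys.length : Int) + 1 by simp, hsplit, hlast, List.filter_append, List.map_append,
        List.filter_congr (by intro i hi; rw [hget i hi]),
        List.map_congr_left (fun i hi => hget i (List.mem_of_mem_filter hi)), ih]
    by_cases hp : p y <;> simp [hgy, hp]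

-- the two searches agree on every input
theorem search_eq_alt (query : String) (documents : List String) :
    search query documents = search_alt query documents := by
  unfold search search_alt
  by_cases hq : (PySem.Str.strip query).toList = []
  · simp [hq]
  · simp only [hq, ite_false]
    have hqne : query.toList ≠ [] := by
      intro h
      apply hq
      simp [h, PySem.Chars.strip, PySem.Chars.lstrip, PySem.Chars.rstrip]
    -- A side: the append loop is a filter
    rw [PySem.List.foldl_append_if_eq_filter]
    -- B side: fuse the per-term filters, translate index membership, map back
    rw [foldl_filter_all]
    rw [List.filter_congr (l := PySem.List.pyRange 0 (documents.length : Int) 1)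
        (q := fun i => (wordsOf query).all
            (fun t => (wordsOf (PySem.List.pyGetD documents i "")).contains t)) ?_]
    · rw [rangeFilterMap documents
          (fun doc => (wordsOf query).all (fun t => (wordsOf doc).contains t))]
      apply List.filter_congr
      intro doc _
      simp only [booleanTermMatch, hqne]
      rfl
    · intro i hi
      rw [PySem.List.mem_pyRange_one] at hi
      obtain ⟨k, rfl⟩ : ∃ k : Nat, i = (k : Int) := ⟨i.toNat, by omega⟩
      have hk : k < documents.length := by exact_mod_cast hi.2
      refine List.all_congr rfl fun t => ?_
      rw [Bool.eq_iff_iff]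
      rw [PySem.Set.contains_iff, mem_getD_buildIndex]
      simp only [PySem.Dict.getD_empty, PySem.Set.empty]
      constructor
      · rintro (h | ⟨p, hp, hip, ht⟩)
        · simp at h
        · rw [PySem.List.mem_enumerate_iff] at hp
          obtain ⟨m, hm, rfl⟩ := hp
          simp only [zero_add] at hip ht
          have hmk : m = k := by exact_mod_cast hip.symm
          subst hmk
          simpa [PySem.List.pyGetD_natCast, List.getD_eq_getElem?_getD, hm] using ht
      · intro ht
        refine Or.inr ⟨((k : Int), documents[k]), ?_, rfl, ?_⟩
        · rw [PySem.List.mem_enumerate_iff]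
          exact ⟨k, hk, by simp⟩
        · simpa [PySem.List.pyGetD_natCast, List.getD_eq_getElem?_getD, hk] using ht

-- ===== VERDICT (by name: the statement is the Claim_ definition above) =====
theorem search_spec : Claim_equal_search := by
  intro query documents _
  unfold Spec_search
  exact search_eq_alt query documents
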